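-- pv_equiv track=rewrite | github.com/huo-ju/progrockdiffusion | prd.py | grid_coords
-- ===== SOURCE A (Python) =====
-- def grid_coords(target, original, overlap):
--     #generate a list of coordinate tuples for our sections, in order of how they'll be rendered
--     #target should be the size for the gobig result, original is the size of each chunk being rendered
--     center = []
--     target_x, target_y = target
--     center_x = int(target_x / 2)
--     center_y = int(target_y / 2)
--     original_x, original_y = original
--     x = center_x - int(original_x / 2)
--     y = center_y - int(original_y / 2)
--     center.append((x,y)) #center chunk
--     uy = y #up
--     uy_list = []
--     dy = y #down
--     dy_list = []
--     lx = x #left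
--     lx_list = []
--     rx = x #right
--     rx_list = []
--     while uy > 0: #center row vertical up
--         uy = uy - original_y + overlap
--         uy_list.append((lx, uy))
--     while (dy + original_y) <= target_y: #center row vertical down
--         dy = dy + original_y - overlap
--         dy_list.append((rx, dy))
--     while lx > 0:
--         lx = lx - original_x + overlap
--         lx_list.append((lx, y))
--         uy = y
--         while uy > 0:
--             uy = uy - original_y + overlap
--             uy_list.append((lx, uy))
--         dy = y
--         while (dy + original_y) <= target_y:
--             dy = dy + original_y - overlap
--             dy_list.append((lx, dy))
--     while (rx + original_x) <= target_x:
--         rx = rx + original_x - overlap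
--         rx_list.append((rx, y))
--         uy = y
--         while uy > 0:
--             uy = uy - original_y + overlap
--             uy_list.append((rx, uy))
--         dy = y
--         while (dy + original_y) <= target_y:
--             dy = dy + original_y - overlap
--             dy_list.append((rx, dy))
--     # now put all the chunks into one master list of coordinates (essentially reverse of how we calculated them so that the central slices will be on top)
--     result = []
--     for coords in dy_list[::-1]:
--         result.append(coords)
--     for coords in uy_list[::-1]:
--         result.append(coords)
--     for coords in rx_list[::-1]:
--         result.append(coords)
--     for coords in lx_list[::-1]:
--         result.append(coords)
--     result.append(center[0])
--     return result
-- ===== SOURCE B (Python) =====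
-- def grid_coords(target, original, overlap):
--     tx, ty = target
--     ox, oy = original
--     x = int(tx / 2) - int(ox / 2)
--     y = int(ty / 2) - int(oy / 2)
--     sx = ox - overlap
--     sy = oy - overlap
--     # closed-form trip counts of the four axis walks (no stepping loops)
--     nl = -(-x // sx) if x > 0 else 0
--     nr = (tx - ox - x) // sx + 1 if x + ox <= tx else 0
--     nu = -(-y // sy) if y > 0 else 0
--     nd = (ty - oy - y) // sy + 1 if y + oy <= ty else 0
--     # columns already in final (reversed) order: rights desc, lefts desc, center
--     rev_cols = ([x + i * sx for i in range(nr, 0, -1)]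
--                 + [x - i * sx for i in range(nl, 0, -1)]
--                 + [x])
--     return ([(c, y + j * sy) for c in rev_cols for j in range(nd, 0, -1)]
--             + [(c, y - j * sy) for c in rev_cols for j in range(nu, 0, -1)]
--             + [(x + i * sx, y) for i in range(nr, 0, -1)]
--             + [(x - i * sx, y) for i in range(nl, 0, -1)]
--             + [(x, y)])
-- ===== Notes on version B (the rewrite author's own statement) =====
-- stated objective: alternative
-- what changed: Replaces A's nested stepping while-loops with mutable accumulators by closed-form trip counts (ceiling/floor division) for the four axis walks, then emits the result directly in final order from descending range comprehensions, with no stepping and no list reversals.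
import Mathlib
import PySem

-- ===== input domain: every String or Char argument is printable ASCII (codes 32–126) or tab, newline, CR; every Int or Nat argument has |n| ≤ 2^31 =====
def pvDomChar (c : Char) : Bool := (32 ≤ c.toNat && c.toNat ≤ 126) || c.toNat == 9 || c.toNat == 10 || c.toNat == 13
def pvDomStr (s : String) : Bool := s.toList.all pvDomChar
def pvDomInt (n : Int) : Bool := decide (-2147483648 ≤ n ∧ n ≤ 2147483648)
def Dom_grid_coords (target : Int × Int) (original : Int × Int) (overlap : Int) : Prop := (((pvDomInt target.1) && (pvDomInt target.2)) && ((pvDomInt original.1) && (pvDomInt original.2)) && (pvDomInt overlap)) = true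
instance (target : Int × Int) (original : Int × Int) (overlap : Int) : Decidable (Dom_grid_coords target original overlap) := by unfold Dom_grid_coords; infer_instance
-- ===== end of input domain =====

-- B computes the trip count of each of A's four axis walks in closed form (ceiling/floor
-- division) and emits the chunks directly in final order from descending ranges (alternative
-- decomposition, same cost).
-- ===== PORT A =====
-- A's 'while uy > 0: uy -= original_y - overlap; append (col, uy)'.
-- The '0 < sy' conjunct is a totality guard only: where it fails with uy > 0 the Python loop diverges.
def whileUpA (sy col : Int) (uy : Int) (acc : List (Int × Int)) : List (Int × Int) :=
  if h : 0 < uy ∧ 0 < sy then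
    whileUpA sy col (uy - sy) (acc ++ [(col, uy - sy)])
  else acc
termination_by uy.toNat
decreasing_by omega

-- A's 'while dy + oy <= ty: dy += sy; append (col, dy)'; '0 < sy' is a totality guard.
def whileDownA (sy oy ty col : Int) (dy : Int) (acc : List (Int × Int)) : List (Int × Int) :=
  if h : dy + oy ≤ ty ∧ 0 < sy then
    whileDownA sy oy ty col (dy + sy) (acc ++ [(col, dy + sy)])
  else acc
termination_by (ty + 1 - oy - dy).toNat
decreasing_by omega

-- A's 'while lx > 0' outer loop: advance lx, append to lx_list, rescan both y loops.
def leftLoopA (sx sy oy ty y : Int) (lx : Int) (lxl uyl dyl : List (Int × Int)) :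
    List (Int × Int) × List (Int × Int) × List (Int × Int) :=
  if h : 0 < lx ∧ 0 < sx then
    leftLoopA sx sy oy ty y (lx - sx) (lxl ++ [(lx - sx, y)])
      (whileUpA sy (lx - sx) y uyl) (whileDownA sy oy ty (lx - sx) y dyl)
  else (lxl, uyl, dyl)
termination_by lx.toNat
decreasing_by omega

-- A's 'while rx + ox <= tx' outer loop.
def rightLoopA (sx sy ox oy tx ty y : Int) (rx : Int) (rxl uyl dyl : List (Int × Int)) :
    List (Int × Int) × List (Int × Int) × List (Int × Int) :=
  if h : rx + ox ≤ tx ∧ 0 < sx then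
    rightLoopA sx sy ox oy tx ty y (rx + sx) (rxl ++ [(rx + sx, y)])
      (whileUpA sy (rx + sx) y uyl) (whileDownA sy oy ty (rx + sx) y dyl)
  else (rxl, uyl, dyl)
termination_by (tx + 1 - ox - rx).toNat
decreasing_by omega

def grid_coords (target : Int × Int) (original : Int × Int) (overlap : Int) : List (Int × Int) :=
  let tx := target.1; let ty := target.2
  let ox := original.1; let oy := original.2
  -- int(t/2) truncates toward zero (exact on Dom): Int.tdiv
  let x := tx.tdiv 2 - ox.tdiv 2
  let y := ty.tdiv 2 - oy.tdiv 2
  let sx := ox - overlap; let sy := oy - overlap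
  let uyl0 := whileUpA sy x y []
  let dyl0 := whileDownA sy oy ty x y []
  let l := leftLoopA sx sy oy ty y x [] uyl0 dyl0
  let r := rightLoopA sx sy ox oy tx ty y x [] l.2.1 l.2.2
  r.2.2.reverse ++ r.2.1.reverse ++ r.1.reverse ++ l.1.reverse ++ [(x, y)]

-- ===== PORT B =====
def grid_coords_alt (target : Int × Int) (original : Int × Int) (overlap : Int) : List (Int × Int) :=
  let tx := target.1; let ty := target.2
  let ox := original.1; let oy := original.2
  let x := tx.tdiv 2 - ox.tdiv 2
  let y := ty.tdiv 2 - oy.tdiv 2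
  let sx := ox - overlap; let sy := oy - overlap
  -- closed-form trip counts of the four axis walks
  let nl : Int := if 0 < x then -(PySem.Int.floordiv (-x) sx) else 0
  let nr : Int := if x + ox ≤ tx then PySem.Int.floordiv (tx - ox - x) sx + 1 else 0
  let nu : Int := if 0 < y then -(PySem.Int.floordiv (-y) sy) else 0
  let nd : Int := if y + oy ≤ ty then PySem.Int.floordiv (ty - oy - y) sy + 1 else 0
  -- columns already in final (reversed) order: rights desc, lefts desc, center
  let revCols := (PySem.List.pyRange nr 0 (-1)).map (fun i => x + i * sx)
              ++ (PySem.List.pyRange nl 0 (-1)).map (fun i => x - i * sx) ++ [x]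
  revCols.flatMap (fun c => (PySem.List.pyRange nd 0 (-1)).map (fun j => (c, y + j * sy)))
  ++ revCols.flatMap (fun c => (PySem.List.pyRange nu 0 (-1)).map (fun j => (c, y - j * sy)))
  ++ (PySem.List.pyRange nr 0 (-1)).map (fun i => (x + i * sx, y))
  ++ (PySem.List.pyRange nl 0 (-1)).map (fun i => (x - i * sx, y))
  ++ [(x, y)]

-- ===== PRECONDITION & SPEC =====
-- Pre_ excludes exactly the inputs on which A loops forever (a walk is entered with a
-- non-positive step); A returns on no excluded input.
def Pre_grid_coords (target : Int × Int) (original : Int × Int) (overlap : Int) : Prop :=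
  let tx := target.1; let ty := target.2
  let ox := original.1; let oy := original.2
  let x := tx.tdiv 2 - ox.tdiv 2
  let y := ty.tdiv 2 - oy.tdiv 2
  (0 < ox - overlap ∨ (x ≤ 0 ∧ tx < x + ox)) ∧ (0 < oy - overlap ∨ (y ≤ 0 ∧ ty < y + oy))
instance (target : Int × Int) (original : Int × Int) (overlap : Int) : Decidable (Pre_grid_coords target original overlap) := by unfold Pre_grid_coords; infer_instance

def pvWitness_grid_coords : (Int × Int) × (Int × Int) × Int := ((10, 10), (4, 4), 1)

def Spec_grid_coords (target : Int × Int) (original : Int × Int) (overlap : Int) (out : List (Int × Int)) : Prop := out = grid_coords_alt target original overlap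
instance (target : Int × Int) (original : Int × Int) (overlap : Int) (out : List (Int × Int)) : Decidable (Spec_grid_coords target original overlap out) := by unfold Spec_grid_coords; infer_instance

-- ===== CLAIM (what is proved, stated in full; the proofs are below) =====
def Claim_equal_grid_coords : Prop := ∀ (target : Int × Int) (original : Int × Int) (overlap : Int), Dom_grid_coords target original overlap → Pre_grid_coords target original overlap → Spec_grid_coords target original overlap (grid_coords target original overlap)

-- ===== LEMMAS AND PROOFS =====

-- the value sequence of a 'while v > 0: v -= s' walk
def descWalk (s v : Int) : List Int :=
  if h : 0 < v ∧ 0 < s then (v - s) :: descWalk s (v - s) else []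
termination_by v.toNat
decreasing_by omega

-- the value sequence of a 'while v + o <= t: v += s' walk (m = t - o)
def ascWalk (s m v : Int) : List Int :=
  if h : v ≤ m ∧ 0 < s then (v + s) :: ascWalk s m (v + s) else []
termination_by (m + 1 - v).toNat
decreasing_by omega

theorem whileUpA_eq (sy col : Int) (uy : Int) (acc : List (Int × Int)) :
    whileUpA sy col uy acc = acc ++ (descWalk sy uy).map (fun u => (col, u)) := by
  fun_induction whileUpA sy col uy acc with
  | case1 uy acc h ih =>
    have e : descWalk sy uy = (uy - sy) :: descWalk sy (uy - sy) := by rw [descWalk, dif_pos h]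
    rw [ih, e]; simp
  | case2 uy acc h =>
    rw [descWalk, dif_neg h]; simp

theorem whileDownA_eq (sy oy ty col : Int) (dy : Int) (acc : List (Int × Int)) :
    whileDownA sy oy ty col dy acc = acc ++ (ascWalk sy (ty - oy) dy).map (fun d => (col, d)) := by
  fun_induction whileDownA sy oy ty col dy acc with
  | case1 dy acc h ih =>
    have e : ascWalk sy (ty - oy) dy = (dy + sy) :: ascWalk sy (ty - oy) (dy + sy) := by
      rw [ascWalk, dif_pos ⟨by omega, h.2⟩]
    rw [ih, e]; simp
  | case2 dy acc h =>
    rw [ascWalk, dif_neg (by omega)]; simp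

theorem leftLoopA_eq (sx sy oy ty y : Int) (lx : Int) (lxl uyl dyl : List (Int × Int)) :
    leftLoopA sx sy oy ty y lx lxl uyl dyl =
      (lxl ++ (descWalk sx lx).map (fun c => (c, y)),
       uyl ++ (descWalk sx lx).flatMap (fun c => (descWalk sy y).map (fun u => (c, u))),
       dyl ++ (descWalk sx lx).flatMap (fun c => (ascWalk sy (ty - oy) y).map (fun d => (c, d)))) := by
  fun_induction leftLoopA sx sy oy ty y lx lxl uyl dyl with
  | case1 lx lxl uyl dyl h ih =>
    have e : descWalk sx lx = (lx - sx) :: descWalk sx (lx - sx) := by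
      rw [descWalk, dif_pos h]
    rw [ih, e, whileUpA_eq, whileDownA_eq]; simp
  | case2 lx lxl uyl dyl h =>
    rw [descWalk, dif_neg h]; simp

theorem rightLoopA_eq (sx sy ox oy tx ty y : Int) (rx : Int) (rxl uyl dyl : List (Int × Int)) :
    rightLoopA sx sy ox oy tx ty y rx rxl uyl dyl =
      (rxl ++ (ascWalk sx (tx - ox) rx).map (fun c => (c, y)),
       uyl ++ (ascWalk sx (tx - ox) rx).flatMap (fun c => (descWalk sy y).map (fun u => (c, u))),
       dyl ++ (ascWalk sx (tx - ox) rx).flatMap (fun c => (ascWalk sy (ty - oy) y).map (fun d => (c, d)))) := by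
  fun_induction rightLoopA sx sy ox oy tx ty y rx rxl uyl dyl with
  | case1 rx rxl uyl dyl h ih =>
    have e : ascWalk sx (tx - ox) rx = (rx + sx) :: ascWalk sx (tx - ox) (rx + sx) := by
      rw [ascWalk, dif_pos ⟨by omega, h.2⟩]
    rw [ih, e, whileUpA_eq, whileDownA_eq]; simp
  | case2 rx rxl uyl dyl h =>
    rw [ascWalk, dif_neg (by omega)]; simp

-- closed form of descWalk: exactly n steps when (n-1)*s < v ≤ n*s
theorem descWalk_closed (s : Int) (hs : 0 < s) :
    ∀ (v n : Int), 0 ≤ n → v ≤ n * s → (0 < n → (n - 1) * s < v) →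
      descWalk s v = (PySem.List.pyRange 1 (n + 1) 1).map (fun j => v - j * s) := by
  intro v
  fun_induction descWalk s v with
  | case1 v h ih =>
    intro n hn hub hlb
    have e1 : (n - 1) * s = n * s - s := by ring
    have e2 : (n - 1 - 1) * s = (n - 1) * s - s := by ring
    have hnpos : 0 < n := by nlinarith [h.1]
    have hrec := ih (n - 1) (by omega) (by linarith [hub]) (fun h2 => by linarith [hlb hnpos])
    rw [hrec, PySem.List.pyRange_one_cons (by omega : (1:Int) < n + 1)]
    simp only [List.map_cons, PySem.List.pyRange_one, List.map_map]
    have hlen : (n - 1 + 1 - 1).toNat = (n + 1 - 2).toNat := by omega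
    rw [hlen]
    congr 1
    · ring
    · apply List.map_congr_left
      intro k _
      simp only [Function.comp]
      ring
  | case2 v h =>
    intro n hn hub hlb
    have hv : ¬ 0 < v := fun hv => h ⟨hv, hs⟩
    have hn0 : n = 0 := by
      by_contra hne
      have h1 := hlb (by omega)
      have e1 : (n - 1) * s = n * s - s := by ring
      have : 0 ≤ (n - 1) * s := mul_nonneg (by omega) (by omega)
      linarith
    subst hn0
    rw [PySem.List.pyRange_one_eq_nil (by omega)]; simp

-- closed form of ascWalk: exactly n steps when (n-1)*s ≤ m - v < n*s
theorem ascWalk_closed (s : Int) (hs : 0 < s) (m : Int) :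
    ∀ (v n : Int), 0 ≤ n → m - v < n * s → (0 < n → (n - 1) * s ≤ m - v) →
      ascWalk s m v = (PySem.List.pyRange 1 (n + 1) 1).map (fun j => v + j * s) := by
  intro v
  fun_induction ascWalk s m v with
  | case1 v h ih =>
    intro n hn hub hlb
    have e1 : (n - 1) * s = n * s - s := by ring
    have e2 : (n - 1 - 1) * s = (n - 1) * s - s := by ring
    have hnpos : 0 < n := by nlinarith [h.1]
    have hrec := ih (n - 1) (by omega) (by linarith [hub]) (fun h2 => by linarith [hlb hnpos])
    rw [hrec, PySem.List.pyRange_one_cons (by omega : (1:Int) < n + 1)]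
    simp only [List.map_cons, PySem.List.pyRange_one, List.map_map]
    have hlen : (n - 1 + 1 - 1).toNat = (n + 1 - 2).toNat := by omega
    rw [hlen]
    congr 1
    · ring
    · apply List.map_congr_left
      intro k _
      simp only [Function.comp]
      ring
  | case2 v h =>
    intro n hn hub hlb
    have hv : m < v := by
      by_contra hmv
      exact h ⟨by omega, hs⟩
    have hn0 : n = 0 := by
      by_contra hne
      have h1 := hlb (by omega)
      have : 0 ≤ (n - 1) * s := mul_nonneg (by omega) (by omega)
      linarith
    subst hn0
    rw [PySem.List.pyRange_one_eq_nil (by omega)]; simp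

-- ===== VERDICT (by name: the statement is the Claim_ definition above) =====
-- reversed closed form of descWalk with B's trip count
theorem descRev (s v : Int) (hpre : 0 < s ∨ v ≤ 0) :
    (descWalk s v).reverse =
      (PySem.List.pyRange (if 0 < v then -(PySem.Int.floordiv (-v) s) else 0) 0 (-1)).map
        (fun j => v - j * s) := by
  by_cases hv : 0 < v
  · have hs : 0 < s := hpre.resolve_right (by omega)
    have hq := (PySem.Int.neg_floordiv_neg_eq_iff_of_pos (a := v) (b := s)
      (q := -(PySem.Int.floordiv (-v) s)) hs).mp rfl
    have hq0 : 0 ≤ -(PySem.Int.floordiv (-v) s) := by nlinarith [hq.2]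
    rw [if_pos hv, descWalk_closed s hs v _ hq0 hq.2 (fun _ => hq.1),
      PySem.List.pyRange_neg_one_eq_reverse, ← List.map_reverse]
    norm_num
  · rw [if_neg hv, descWalk, dif_neg (fun hc => hv hc.1),
      PySem.List.pyRange_neg_one_eq_nil (by omega)]
    simp

-- reversed closed form of ascWalk with B's trip count
theorem ascRev (s t o v : Int) (hpre : 0 < s ∨ t < v + o) :
    (ascWalk s (t - o) v).reverse =
      (PySem.List.pyRange (if v + o ≤ t then PySem.Int.floordiv (t - o - v) s + 1 else 0) 0 (-1)).map
        (fun j => v + j * s) := by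
  by_cases hv : v + o ≤ t
  · have hs : 0 < s := hpre.resolve_right (by omega)
    have hb := (PySem.Int.floordiv_eq_iff_of_pos (a := t - o - v) (b := s)
      (q := PySem.Int.floordiv (t - o - v) s) hs).mp rfl
    have hn0 : 0 ≤ PySem.Int.floordiv (t - o - v) s + 1 := by nlinarith [hb.2]
    rw [if_pos hv, ascWalk_closed s hs (t - o) v _ hn0 (by linarith [hb.2])
      (fun _ => by have e : (PySem.Int.floordiv (t - o - v) s + 1 - 1) * s
                      = PySem.Int.floordiv (t - o - v) s * s := by ring
                   rw [e]; exact hb.1),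
      PySem.List.pyRange_neg_one_eq_reverse, ← List.map_reverse]
    norm_num
  · rw [if_neg hv, ascWalk, dif_neg (fun hc => hv (by omega)),
      PySem.List.pyRange_neg_one_eq_nil (by omega)]
    simp

theorem grid_coords_spec : Claim_equal_grid_coords := by
  intro target original overlap _ hpre
  obtain ⟨tx, ty⟩ := target
  obtain ⟨ox, oy⟩ := original
  simp only [Pre_grid_coords] at hpre
  show _ = _
  simp only [grid_coords, grid_coords_alt, whileUpA_eq, whileDownA_eq, leftLoopA_eq,
    rightLoopA_eq]
  set x : Int := tx.tdiv 2 - ox.tdiv 2 with hxdef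
  set y : Int := ty.tdiv 2 - oy.tdiv 2 with hydef
  set sx : Int := ox - overlap with hsxdef
  set sy : Int := oy - overlap with hsydef
  have hL := descRev sx x (hpre.1.imp id And.left)
  have hR := ascRev sx tx ox x (hpre.1.imp id And.right)
  have hU := descRev sy y (hpre.2.imp id And.left)
  have hD := ascRev sy ty oy y (hpre.2.imp id And.right)
  have hUp : ∀ c : Int, (List.map (fun u => (c, u)) (descWalk sy y)).reverse =
      List.map (fun j => (c, y - j * sy))
        (PySem.List.pyRange (if 0 < y then -PySem.Int.floordiv (-y) sy else 0) 0 (-1)) := by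
    intro c; rw [← List.map_reverse, hU, List.map_map]; rfl
  have hDp : ∀ c : Int, (List.map (fun d => (c, d)) (ascWalk sy (ty - oy) y)).reverse =
      List.map (fun j => (c, y + j * sy))
        (PySem.List.pyRange (if y + oy ≤ ty then PySem.Int.floordiv (ty - oy - y) sy + 1 else 0)
          0 (-1)) := by
    intro c; rw [← List.map_reverse, hD, List.map_map]; rfl
  simp only [List.reverse_append, List.reverse_flatMap, ← List.map_reverse,
    List.nil_append, List.append_assoc]
  rw [hL, hR, hU, hD]
  simp [Function.comp_def, hUp, hDp, List.map_map, List.flatMap_append, List.append_assoc]
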